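-- pv_equiv track=rewrite | github.com/cqzxyw66/thinkpython2-practice | think_python/12_02_practice.py | print_sorted_huiwen
-- ===== SOURCE A (Python) =====
-- def word_to_tunle(word):
--     a = list()
--     for i in word:
--         i = i.lower()
--         a.append(i)
--     b = sorted(a)
--     c = tuple(b)
--     return c
--
-- def is_huiwen(word_list):
--     # 新增字典a
--     a = dict()
--     # 遍历输入的列表
--     for word in word_list:
--         b = word_to_tunle(word)
--         c = list()
--         # 当该单词出现（意味着本单词在列表中，而没有出现在已有的列表中）
--         # 时，key为字母顺序元组，value为本单词。
--         if b not in a: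
--             c.append(word)
--             a[b] = c
--         # 如果发现单词的字母顺序元组key出现过，就将value增加一个本单词
--         else:
--             a[b].append(word)
--     # 定义一个新字典c，c字典用来剔除那些值只有1的key-values
--     c = dict()
--     for key, value in a.items():
--         d = len(value)
--         # 判断当值，如果键值对中的值，就是单词数量多于1个时。就能判断此单词有回文兄弟。
--         # 就加入进字典c
--         if d > 1:
--             c[key] = a[key]
--     return c
--
-- def print_sorted_huiwen(word_list):
--     # 先将传入的参数，用is_huiwen函数，返回key为字母顺序，value为单词的字典。而且值是要多于1的。
--     # 1个的不要来~
--     a_dict = is_huiwen(word_list)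
--     b = dict()
--     # 对字典a进行遍历
--     for key, value in a_dict.items():
--         c = len(value)
--         d = list()
--         # 主要将键值对进行反转，key为单词的数量，value为单词列表。
--         # 比如{2:[('abc', 'cba'), ('try', 'yrt')]}
--         if c not in b:
--             d.append(tuple(value))
--             b[c] = d
--         else:
--             b[c].append(tuple(value))
--     # 新建列表c，主要是将key收集起来，进行排序
--     c = list()
--     for key2, value2 in b.items():
--         c.append(key2)
--     d = sorted(c, reverse=True)
--     # 新建列表e，将c里面（已经是从大到小排序的值3、2、1），然后取得字典b里面的b[key]的单词列表
--     e = list()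
--     for key3 in d:
--         e.append(b[key3])
--     return e
--
-- a= list()
--
-- b = print_sorted_huiwen(a)
-- ===== SOURCE B (Python) =====
-- def print_sorted_huiwen(word_list):
--     groups = {}
--     for w in word_list:
--         key = tuple(sorted(w.lower()))
--         groups[key] = groups.get(key, []) + [w]
--     big = [g for g in groups.values() if len(g) > 1]
--     sizes = sorted({len(g) for g in big}, reverse=True)
--     return [[tuple(g) for g in big if len(g) == n] for n in sizes]
-- ===== Notes on version B (the rewrite author's own statement) =====
-- stated objective: simpler
-- what changed: A's second phase (a size->bucket dict, a key-collection loop, a descending key sort, then bucket lookups) is replaced by collecting the qualifying anagram groups into one list and emitting, for each distinct group size in descending order, the sublist of groups of that size via a filter comprehension; the grouping dict itself is built with dict.get accumulation instead of an if/else membership branch.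
import Mathlib
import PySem

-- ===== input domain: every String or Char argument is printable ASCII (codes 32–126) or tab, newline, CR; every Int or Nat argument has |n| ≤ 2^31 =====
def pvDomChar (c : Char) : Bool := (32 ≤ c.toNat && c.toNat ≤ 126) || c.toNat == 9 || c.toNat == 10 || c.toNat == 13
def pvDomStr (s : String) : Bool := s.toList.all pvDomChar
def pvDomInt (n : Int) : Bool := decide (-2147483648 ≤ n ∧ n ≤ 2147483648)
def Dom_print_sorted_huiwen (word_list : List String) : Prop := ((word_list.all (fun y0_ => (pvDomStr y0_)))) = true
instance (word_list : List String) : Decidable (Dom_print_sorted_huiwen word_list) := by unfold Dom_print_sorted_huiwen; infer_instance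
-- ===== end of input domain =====

-- B replaces A's size→bucket dict and key-collect/sort phases by filtering the group list
-- once per distinct size taken in descending order (objective: simpler decomposition).

-- ===== PORT A =====
-- each 1-char string of Python's list is a Char; i.lower() is PySem.Chars.lower on the singleton (exact on ASCII)
def word_to_tunle (word : String) : List Char :=
  let a := word.toList.foldl (fun a i => a ++ PySem.Chars.lower [i]) []
  let b := PySem.List.sorted a id
  b

def is_huiwen (word_list : List String) : PySem.Dict (List Char) (List String) :=
  let a := word_list.foldl (fun a word =>
    let b := word_to_tunle word
    if a.contains b = false then a.insert b [word]
    else a.modify b [] (fun v => v ++ [word])) PySem.Dict.empty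
  let c := a.items.foldl (fun c kv =>
    if kv.2.length > 1 then c.insert kv.1 (a.getD kv.1 []) else c) PySem.Dict.empty
  c

def print_sorted_huiwen (word_list : List String) : List (List (List String)) :=
  let a_dict := is_huiwen word_list
  let b := a_dict.items.foldl (fun b kv =>
    let c : Int := kv.2.length
    if b.contains c = false then b.insert c [kv.2]
    else b.modify c [] (fun v => v ++ [kv.2])) PySem.Dict.empty
  let c := b.items.foldl (fun c kv => c ++ [kv.1]) ([] : List Int)
  let d := PySem.List.sorted c id true
  -- b[key3] never raises: key3 is drawn from b's own keys, so getD is exact here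
  let e := d.foldl (fun e key3 => e ++ [b.getD key3 []]) []
  e

-- ===== PORT B =====
def print_sorted_huiwen_alt (word_list : List String) : List (List (List String)) :=
  let groups := word_list.foldl (fun g w =>
    let key := PySem.List.sorted (PySem.Chars.lower w.toList) id
    g.insert key (g.getD key [] ++ [w])) PySem.Dict.empty
  let big := groups.values.filter (fun g => g.length > 1)
  let sizes := PySem.List.sorted (PySem.Set.ofList (big.map (fun g => (g.length : Int)))) id true
  sizes.map (fun n => big.filter (fun g => (g.length : Int) == n))

-- ===== PRECONDITION & SPEC =====
def Spec_print_sorted_huiwen (word_list : List String) (out : List (List (List String))) : Prop := out = print_sorted_huiwen_alt word_list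
instance (word_list : List String) (out : List (List (List String))) : Decidable (Spec_print_sorted_huiwen word_list out) := by unfold Spec_print_sorted_huiwen; infer_instance

-- ===== CLAIM (what is proved, stated in full; the proofs are below) =====
def Claim_equal_print_sorted_huiwen : Prop := ∀ (word_list : List String), Dom_print_sorted_huiwen word_list → Spec_print_sorted_huiwen word_list (print_sorted_huiwen word_list)

-- ===== LEMMAS AND PROOFS =====

-- the anagram key both programs compute
def pvKey (w : String) : List Char := PySem.List.sorted (PySem.Chars.lower w.toList) id

-- the grouping dict both first loops build
def pvG (word_list : List String) : PySem.Dict (List Char) (List String) :=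
  word_list.foldl (fun d w => d.modify (pvKey w) [] (fun v => v ++ [w])) PySem.Dict.empty

lemma word_to_tunle_eq (w : String) : word_to_tunle w = pvKey w := by
  unfold word_to_tunle pvKey
  rw [PySem.List.foldl_append_eq_flatMap]
  simp only [List.nil_append, PySem.Chars.lower, List.map_cons, List.map_nil]
  rw [← List.map_eq_flatMap]

lemma a_fold_eq (word_list : List String) :
    word_list.foldl (fun a word =>
      let b := word_to_tunle word
      if a.contains b = false then a.insert b [word]
      else a.modify b [] (fun v => v ++ [word])) PySem.Dict.empty = pvG word_list := by
  unfold pvG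
  refine PySem.List.foldl_congr_mem _ _ _ _ (fun d w _ => ?_)
  simp only [word_to_tunle_eq]
  by_cases h : d.contains (pvKey w)
  · simp [h]
  · simp only [Bool.not_eq_true] at h
    simp [h, PySem.Dict.modify, PySem.Dict.getD_of_not_contains _ _ h]

lemma alt_fold_eq (word_list : List String) :
    word_list.foldl (fun g w =>
      let key := PySem.List.sorted (PySem.Chars.lower w.toList) id
      g.insert key (g.getD key [] ++ [w])) PySem.Dict.empty = pvG word_list := rfl

lemma nodup_keys_pvG (word_list : List String) : (pvG word_list).keys.Nodup := by
  unfold pvG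
  exact PySem.Dict.nodup_keys_foldl_modify_key _ pvKey _ _ _ (by simp)

lemma is_huiwen_items (word_list : List String) :
    (is_huiwen word_list).items
      = (pvG word_list).items.filter (fun kv => decide (kv.2.length > 1)) := by
  unfold is_huiwen
  simp only [a_fold_eq]
  rw [PySem.List.foldl_ite_eq_foldl_filter]
  have hnd : ((pvG word_list).items.map (fun kv => kv.1)).Nodup := nodup_keys_pvG word_list
  have hsub : ((pvG word_list).items.filter (fun kv => decide (kv.2.length > 1))).Sublist
      (pvG word_list).items := List.filter_sublist
  rw [PySem.Dict.items_foldl_insert_fresh _ _ _ _ (fun a _ => by simp)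
    ((hsub.map (fun kv => kv.1)).nodup hnd)]
  have hempty : (PySem.Dict.empty : PySem.Dict (List Char) (List String)).items = [] := rfl
  rw [hempty, List.nil_append]
  have hcongr : ∀ kv ∈ (pvG word_list).items.filter (fun kv => decide (kv.2.length > 1)),
      (kv.1, (pvG word_list).getD kv.1 []) = id kv := by
    intro kv hkv
    have hmem : kv ∈ (pvG word_list).items := List.mem_of_mem_filter hkv
    have hget := PySem.Dict.getD_of_mem_items (d := pvG word_list) (k := kv.1) (v := kv.2)
      (by exact hmem) (nodup_keys_pvG word_list) []
    simp [hget]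
  rw [List.map_congr_left hcongr, List.map_id]

-- A's size→bucket loop is the canonical modify-grouping fold over (size, group) pairs
lemma b_fold_eq (l : List ((List Char) × (List String))) :
    l.foldl (fun b kv =>
      let c : Int := kv.2.length
      if b.contains c = false then b.insert c [kv.2]
      else b.modify c [] (fun v => v ++ [kv.2])) PySem.Dict.empty
    = (l.map (fun kv => ((kv.2.length : Int), kv.2))).foldl
        (fun d p => d.modify p.1 [] (fun v => v ++ [p.2])) PySem.Dict.empty := by
  rw [List.foldl_map]
  refine PySem.List.foldl_congr_mem _ _ _ _ (fun d kv _ => ?_)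
  by_cases h : d.contains ((kv.2.length : Int))
  · simp [h]
  · simp only [Bool.not_eq_true] at h
    simp [h, PySem.Dict.modify, PySem.Dict.getD_of_not_contains _ _ h]

-- ===== VERDICT (by name: the statement is the Claim_ definition above) =====
theorem print_sorted_huiwen_spec : Claim_equal_print_sorted_huiwen := by
  intro word_list _
  unfold Spec_print_sorted_huiwen print_sorted_huiwen print_sorted_huiwen_alt
  simp only [alt_fold_eq, is_huiwen_items, b_fold_eq]
  rw [PySem.List.foldl_append_singleton_eq_map, PySem.List.foldl_append_singleton_eq_map]
  simp only [List.nil_append]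
  have hkeys : ∀ (l : List (Int × List String)),
      (l.foldl (fun d p => d.modify p.1 [] (fun v => v ++ [p.2])) PySem.Dict.empty).items.map
        (fun kv => kv.1) = PySem.Set.ofList (l.map (fun p => p.1)) := by
    intro l
    have h := PySem.Dict.keys_foldl_modify_key l (fun p => p.1) []
      (fun _ p => (fun v => v ++ [p.2])) PySem.Dict.empty
    simpa [PySem.Dict.keys, PySem.Dict.keys_empty, PySem.Set.update_nil_left] using h
  rw [hkeys]
  simp only [PySem.Dict.getD_foldl_modify_append, PySem.Dict.getD_empty, List.nil_append]
  simp [PySem.Dict.values, List.filter_map, List.map_map, Function.comp_def]
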